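-- pv_equiv track=rewrite | github.com/Rugbydude80/localops-ai | backend/services/ai_scheduling_engine.py | _find_related_skills
-- ===== SOURCE A (Python) =====
-- from typing import List, Dict, Optional, Tuple, Any
--
-- def _find_related_skills(staff_skills: List[str], required_skill: str) -> List[str]:
--     """Find related skills that might be relevant"""
--     skill_relationships = {
--         "kitchen": ["prep", "grill", "fryer"],
--         "bar": ["cocktails", "wine", "beer"],
--         "service": ["waiter", "host", "cashier"],
--         "management": ["supervisor", "shift_lead", "assistant_manager"]
--     }
--
--     related = []
--     for skill in staff_skills:
--         if skill != required_skill: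
--             # Check if skills are in the same category
--             for category, skills in skill_relationships.items():
--                 if required_skill in skills and skill in skills:
--                     related.append(skill)
--
--     return related
-- ===== SOURCE B (Python) =====
-- from typing import List
--
-- _SKILL_CATEGORIES = [
--     ["prep", "grill", "fryer"],
--     ["cocktails", "wine", "beer"],
--     ["waiter", "host", "cashier"],
--     ["supervisor", "shift_lead", "assistant_manager"],
-- ]
--
-- def _find_related_skills(staff_skills: List[str], required_skill: str) -> List[str]:
--     """Find related skills that might be relevant"""
--     related = set()
--     for skills in _SKILL_CATEGORIES:
--         if required_skill in skills:
--             related.update(skills)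
--     return [s for s in staff_skills if s != required_skill and s in related]
-- ===== Notes on version B (the rewrite author's own statement) =====
-- stated objective: simpler
-- what changed: B builds the set of skills related to required_skill once (union of the categories containing it) and then filters staff_skills in a single membership-test pass, instead of A's per-skill rescan of every category with repeated appends.
import Mathlib
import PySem

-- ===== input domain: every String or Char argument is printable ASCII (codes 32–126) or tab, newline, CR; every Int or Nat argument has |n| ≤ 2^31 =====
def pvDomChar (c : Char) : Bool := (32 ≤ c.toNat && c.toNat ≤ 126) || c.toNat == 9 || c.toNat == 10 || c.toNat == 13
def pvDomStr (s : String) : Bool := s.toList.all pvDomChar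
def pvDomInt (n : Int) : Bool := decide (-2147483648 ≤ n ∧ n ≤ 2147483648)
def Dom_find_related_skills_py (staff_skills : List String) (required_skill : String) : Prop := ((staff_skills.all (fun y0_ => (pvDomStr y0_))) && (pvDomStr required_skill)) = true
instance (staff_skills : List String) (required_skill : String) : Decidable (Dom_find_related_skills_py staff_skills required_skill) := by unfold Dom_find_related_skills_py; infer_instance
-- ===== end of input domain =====

-- B replaces A's per-skill rescan of every category by a one-time union of the
-- categories containing required_skill followed by a single filtering pass (simpler).

-- ===== PORT A =====
-- the literal dict from A (association list in insertion order)
def skillRelationships : List (String × List String) :=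
  [("kitchen", ["prep", "grill", "fryer"]),
   ("bar", ["cocktails", "wine", "beer"]),
   ("service", ["waiter", "host", "cashier"]),
   ("management", ["supervisor", "shift_lead", "assistant_manager"])]

def find_related_skills_py (staff_skills : List String) (required_skill : String) : List String :=
  staff_skills.foldl (fun related skill =>
    if skill ≠ required_skill then
      skillRelationships.foldl (fun related kv =>
        if required_skill ∈ kv.2 ∧ skill ∈ kv.2 then related ++ [skill] else related) related
    else related) []

-- ===== PORT B =====
-- B's module constant: the category lists (the values of A's dict)
def skillCategories : List (List String) :=
  [["prep", "grill", "fryer"],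
   ["cocktails", "wine", "beer"],
   ["waiter", "host", "cashier"],
   ["supervisor", "shift_lead", "assistant_manager"]]

def find_related_skills_py_alt (staff_skills : List String) (required_skill : String) : List String :=
  let related : PySem.Set String :=
    skillCategories.foldl (fun related skills =>
      if required_skill ∈ skills then PySem.Set.update related skills else related) PySem.Set.empty
  staff_skills.filter (fun s => decide (s ≠ required_skill) && PySem.Set.contains related s)

-- ===== PRECONDITION & SPEC =====
def Spec_find_related_skills_py (staff_skills : List String) (required_skill : String) (out : List String) : Prop := out = find_related_skills_py_alt staff_skills required_skill
instance (staff_skills : List String) (required_skill : String) (out : List String) : Decidable (Spec_find_related_skills_py staff_skills required_skill out) := by unfold Spec_find_related_skills_py; infer_instance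

-- ===== CLAIM (what is proved, stated in full; the proofs are below) =====
def Claim_equal_find_related_skills_py : Prop := ∀ (staff_skills : List String) (required_skill : String), Dom_find_related_skills_py staff_skills required_skill → Spec_find_related_skills_py staff_skills required_skill (find_related_skills_py staff_skills required_skill)

-- ===== LEMMAS AND PROOFS =====

-- A's inner loop, abstracted over the category list
def innerA (req skill : String) (cats : List (String × List String)) (acc : List String) : List String :=
  cats.foldl (fun related kv =>
    if req ∈ kv.2 ∧ skill ∈ kv.2 then related ++ [skill] else related) acc

lemma innerA_cons (req skill : String) (kv : String × List String)
    (cs : List (String × List String)) (acc : List String) :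
    innerA req skill (kv :: cs) acc =
      innerA req skill cs (if req ∈ kv.2 ∧ skill ∈ kv.2 then acc ++ [skill] else acc) := rfl

-- B's set of related skills, abstracted over the category list
def relSet (req : String) (cats : List (List String)) (s : PySem.Set String) : PySem.Set String :=
  cats.foldl (fun related skills =>
    if req ∈ skills then PySem.Set.update related skills else related) s

lemma relSet_cons (req : String) (c : List String) (cs : List (List String)) (s : PySem.Set String) :
    relSet req (c :: cs) s = relSet req cs (if req ∈ c then PySem.Set.update s c else s) := rfl

lemma mem_relSet (req : String) (cats : List (List String)) (s : PySem.Set String) (x : String) :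
    x ∈ relSet req cats s ↔ x ∈ s ∨ ∃ c ∈ cats, req ∈ c ∧ x ∈ c := by
  induction cats generalizing s with
  | nil => simp [relSet]
  | cons c cs ih =>
    rw [relSet_cons]
    by_cases h : req ∈ c
    · rw [if_pos h, ih, PySem.Set.mem_update]
      simp [h]
      tauto
    · rw [if_neg h, ih]
      simp [h]

lemma innerA_of_none (req skill : String) (cats : List (String × List String)) (acc : List String)
    (h : ∀ kv ∈ cats, ¬(req ∈ kv.2 ∧ skill ∈ kv.2)) : innerA req skill cats acc = acc := by
  induction cats generalizing acc with
  | nil => rfl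
  | cons kv cs ih =>
    rw [innerA_cons, if_neg (h kv (by simp))]
    exact ih acc (fun kv' h' => h kv' (by simp [h']))

lemma innerA_eq (req skill : String) (cats : List (String × List String)) (acc : List String)
    (hdisj : cats.Pairwise (fun a b => ∀ x ∈ a.2, x ∉ b.2)) :
    innerA req skill cats acc =
      acc ++ (if ∃ kv ∈ cats, req ∈ kv.2 ∧ skill ∈ kv.2 then [skill] else []) := by
  induction cats generalizing acc with
  | nil => simp [innerA]
  | cons kv cs ih =>
    rcases List.pairwise_cons.mp hdisj with ⟨hhd, htl⟩
    rw [innerA_cons]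
    by_cases h : req ∈ kv.2 ∧ skill ∈ kv.2
    · rw [if_pos h]
      have hnone : ∀ kv' ∈ cs, ¬(req ∈ kv'.2 ∧ skill ∈ kv'.2) := by
        intro kv' hm hc
        exact hhd kv' hm skill h.2 hc.2
      rw [innerA_of_none req skill cs (acc ++ [skill]) hnone,
          if_pos (⟨kv, by simp, h⟩ : ∃ kv' ∈ kv :: cs, req ∈ kv'.2 ∧ skill ∈ kv'.2)]
    · rw [if_neg h, ih acc htl]
      congr 1
      by_cases he : ∃ kv' ∈ cs, req ∈ kv'.2 ∧ skill ∈ kv'.2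
      · rcases he with ⟨kv', hm, hc⟩
        rw [if_pos ⟨kv', hm, hc⟩, if_pos ⟨kv', by simp [hm], hc⟩]
      · rw [if_neg he, if_neg ?_]
        rintro ⟨kv', hm, hc⟩
        rcases List.mem_cons.mp hm with rfl | hm'
        · exact h hc
        · exact he ⟨kv', hm', hc⟩

lemma disj : skillRelationships.Pairwise (fun a b => ∀ x ∈ a.2, x ∉ b.2) := by decide

lemma mem_relSet_concrete (req skill : String) :
    skill ∈ relSet req skillCategories PySem.Set.empty ↔
      ∃ kv ∈ skillRelationships, req ∈ kv.2 ∧ skill ∈ kv.2 := by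
  rw [mem_relSet]
  simp [PySem.Set.empty, skillCategories, skillRelationships]

lemma outer_eq (staff_skills : List String) (req : String) (acc : List String) :
    staff_skills.foldl (fun related skill =>
      if skill ≠ req then innerA req skill skillRelationships related else related) acc
    = acc ++ staff_skills.filter
        (fun s => decide (s ≠ req) && PySem.Set.contains (relSet req skillCategories PySem.Set.empty) s) := by
  induction staff_skills generalizing acc with
  | nil => simp
  | cons skill rest ih =>
    simp only [List.foldl_cons, List.filter_cons]
    by_cases hne : skill ≠ req
    · rw [if_pos hne, innerA_eq req skill skillRelationships acc disj, ih]
      by_cases hin : skill ∈ relSet req skillCategories PySem.Set.empty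
      · rw [if_pos ((mem_relSet_concrete req skill).mp hin)]
        simp [hne, List.append_assoc]
        exact hin
      · rw [if_neg (fun h => hin ((mem_relSet_concrete req skill).mpr h))]
        simp
        exact fun _ => hin
    · rw [if_neg hne, ih]
      simp only [ne_eq, not_not] at hne
      simp [hne]

-- ===== VERDICT (by name: the statement is the Claim_ definition above) =====
theorem find_related_skills_py_spec : Claim_equal_find_related_skills_py := by
  intro staff_skills req _
  show find_related_skills_py staff_skills req = find_related_skills_py_alt staff_skills req
  unfold find_related_skills_py find_related_skills_py_alt
  simpa [innerA, relSet] using outer_eq staff_skills req []
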